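-- pv_equiv track=rewrite | github.com/01joy/query-correction | code/util.py | has_letters
-- ===== SOURCE A (Python) =====
-- def has_letters(seq):
--     l=-1
--     r=-1
--     seq=[i.lower() for i in seq]
--     for i, c in enumerate(seq):
--         if c>='a' and c<='z' and l==-1:
--             l=i
--         if c>='a' and c<='z':
--             r=i
--     return l,r+1
-- ===== SOURCE B (Python) =====
-- def has_letters(seq):
--     low = [s.lower() for s in seq]
--     l = -1
--     for i, s in enumerate(low):
--         if 'a' <= s <= 'z':
--             l = i
--             break
--     r = -1
--     for i, s in reversed(list(enumerate(low))):
--         if 'a' <= s <= 'z':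
--             r = i
--             break
--     return l, r + 1
-- ===== Notes on version B (the rewrite author's own statement) =====
-- stated objective: alternative
-- what changed: Replaces A's single fold that updates both endpoints on every element with two early-exit directional searches: first letter-like element scanning forward, and first one scanning the reversed enumeration.
import Mathlib
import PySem

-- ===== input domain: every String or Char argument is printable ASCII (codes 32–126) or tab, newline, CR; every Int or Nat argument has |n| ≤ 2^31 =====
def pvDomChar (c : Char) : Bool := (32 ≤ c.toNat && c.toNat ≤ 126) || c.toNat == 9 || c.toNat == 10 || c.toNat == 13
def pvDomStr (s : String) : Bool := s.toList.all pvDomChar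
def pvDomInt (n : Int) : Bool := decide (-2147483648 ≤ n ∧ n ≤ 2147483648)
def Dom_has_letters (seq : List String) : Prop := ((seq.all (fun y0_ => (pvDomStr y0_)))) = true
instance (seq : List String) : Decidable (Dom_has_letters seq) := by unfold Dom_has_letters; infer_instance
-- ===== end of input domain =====

-- B replaces A's single fold that tracks both endpoints by two early-exit directional
-- searches (first match forward, first match on the reversed enumeration); objective: alternative.

-- the Python test `c >= 'a' and c <= 'z'` on a (lowered) string, via code-point
-- lexicographic order on the character list (exact for Python's str comparison)
def pvLetterish (c : String) : Bool :=
  decide ((['a'] : List Char) ≤ c.toList) && decide (c.toList ≤ (['z'] : List Char))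

-- ===== PORT A =====
def has_letters (seq : List String) : Int × Int :=
  let seq2 := seq.map PySem.Str.lower
  let st := (PySem.List.enumerate seq2 0).foldl
    (fun (st : Int × Int) (ic : Int × String) =>
      let l := if pvLetterish ic.2 && st.1 == -1 then ic.1 else st.1
      let r := if pvLetterish ic.2 then ic.1 else st.2
      (l, r)) (-1, -1)
  (st.1, st.2 + 1)

-- ===== PORT B =====
-- forward scan with break: first enumerated element passing the test, else -1
def pvFindFirst : List (Int × String) → Int
  | [] => -1
  | (i, s) :: t => if pvLetterish s then i else pvFindFirst t

def has_letters_alt (seq : List String) : Int × Int :=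
  let low := seq.map PySem.Str.lower
  let l := pvFindFirst (PySem.List.enumerate low 0)
  let r := pvFindFirst (PySem.List.enumerate low 0).reverse
  (l, r + 1)

-- ===== PRECONDITION & SPEC =====
def Spec_has_letters (seq : List String) (out : Int × Int) : Prop := out = has_letters_alt seq
instance (seq : List String) (out : Int × Int) : Decidable (Spec_has_letters seq out) := by unfold Spec_has_letters; infer_instance

-- ===== CLAIM (what is proved, stated in full; the proofs are below) =====
def Claim_equal_has_letters : Prop := ∀ (seq : List String), Dom_has_letters seq → Spec_has_letters seq (has_letters seq)

-- ===== LEMMAS AND PROOFS =====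

-- the second component of A's fold, in isolation
def pvLastD (xs : List (Int × String)) (r0 : Int) : Int :=
  xs.foldl (fun r ic => if pvLetterish ic.2 then ic.1 else r) r0

lemma pvFold_eq (xs : List (Int × String)) (h : ∀ p ∈ xs, 0 ≤ p.1) (l0 r0 : Int) :
    xs.foldl (fun (st : Int × Int) (ic : Int × String) =>
      let l := if pvLetterish ic.2 && st.1 == -1 then ic.1 else st.1
      let r := if pvLetterish ic.2 then ic.1 else st.2
      (l, r)) (l0, r0)
    = ((if l0 = -1 then pvFindFirst xs else l0), pvLastD xs r0) := by
  induction xs generalizing l0 r0 with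
  | nil => simp [pvFindFirst, pvLastD]
  | cons x t ih =>
    obtain ⟨i, s⟩ := x
    have hi : (0:Int) ≤ i := h (i, s) (by simp)
    have ht : ∀ p ∈ t, (0:Int) ≤ p.1 := fun p hp => h p (by simp [hp])
    rw [List.foldl_cons]
    dsimp only
    rw [ih ht]
    have hne : ¬ (i = -1) := by omega
    by_cases hp : pvLetterish s
    · by_cases hl : l0 = -1
      · simp [hp, hl, hne, pvFindFirst, pvLastD]
      · simp [hp, hl, pvLastD]
    · simp [hp, pvFindFirst, pvLastD]

lemma pvLastD_append_single (xs : List (Int × String)) (x : Int × String) (r0 : Int) :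
    pvLastD (xs ++ [x]) r0 = if pvLetterish x.2 then x.1 else pvLastD xs r0 := by
  simp [pvLastD, List.foldl_append]

lemma pvLastD_rev (xs : List (Int × String)) :
    pvLastD xs (-1) = pvFindFirst xs.reverse := by
  induction xs using List.reverseRecOn with
  | nil => simp [pvLastD, pvFindFirst]
  | append_singleton t x ih =>
    obtain ⟨i, s⟩ := x
    rw [pvLastD_append_single]
    simp only [List.reverse_append, List.reverse_cons, List.reverse_nil, List.nil_append,
      List.cons_append, pvFindFirst]
    by_cases hp : pvLetterish s <;> simp [hp, ih]

lemma pvEnum_nonneg (xs : List String) :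
    ∀ p ∈ PySem.List.enumerate xs 0, (0:Int) ≤ p.1 := by
  intro p hp
  rw [PySem.List.mem_enumerate_iff] at hp
  obtain ⟨k, hk, rfl⟩ := hp
  simp

-- ===== VERDICT (by name: the statement is the Claim_ definition above) =====
theorem has_letters_spec : Claim_equal_has_letters := by
  intro seq _
  unfold Spec_has_letters has_letters has_letters_alt
  dsimp only
  rw [pvFold_eq _ (pvEnum_nonneg _)]
  simp [pvLastD_rev]
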